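-- pv_equiv track=rewrite | github.com/anurag9601/brocode_challenge | 1_dec.py | help_bobby
-- ===== SOURCE A (Python) =====
-- def help_bobby(n):
--     final = []
--     count = 1
--     for i in range(n):
--         temp = []
--         for j in range(n):
--             if(i==j):
--                 temp.append(1)
--             elif(n-count == j):
--                 temp.append(1)
--             else:
--                 temp.append(0)
--         final.append(temp)
--         count += 1
--     return final
-- ===== SOURCE B (Python) =====
-- def help_bobby(n):
--     # Exploit the matrix's twofold symmetry: each row is a palindrome built by
--     # concatenating zero-blocks around the 1s, and the bottom half of the matrix
--     # is the mirror image of the top half, so only ceil(n/2) rows are constructed.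
--     half = []
--     for i in range((n + 1) // 2):
--         gap = n - 2 * i - 2
--         if gap >= 0:
--             half.append([0] * i + [1] + [0] * gap + [1] + [0] * i)
--         else:  # middle row of an odd-sized matrix: the two diagonals coincide
--             half.append([0] * i + [1] + [0] * i)
--     return half + half[:n // 2][::-1]
-- ===== Notes on version B (the rewrite author's own statement) =====
-- stated objective: alternative
-- what changed: B builds only the top ceil(n/2) rows, each assembled by concatenating zero-blocks around the two 1s (no per-cell test, no per-cell index scan), and obtains the bottom half as the reversed mirror of the top, instead of A's nested loop testing every cell against two diagonal conditions.
import Mathlib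
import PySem

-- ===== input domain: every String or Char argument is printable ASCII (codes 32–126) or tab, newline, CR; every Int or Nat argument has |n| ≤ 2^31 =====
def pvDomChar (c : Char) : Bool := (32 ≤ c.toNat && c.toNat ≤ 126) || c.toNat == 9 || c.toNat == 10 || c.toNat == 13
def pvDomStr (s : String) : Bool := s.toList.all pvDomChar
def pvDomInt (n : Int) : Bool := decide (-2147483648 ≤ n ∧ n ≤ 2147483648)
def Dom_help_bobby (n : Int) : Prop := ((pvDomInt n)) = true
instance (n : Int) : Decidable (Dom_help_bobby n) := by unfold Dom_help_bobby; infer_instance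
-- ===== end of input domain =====

-- B builds only the top ceil(n/2) rows by concatenating zero-blocks around the 1s and mirrors
-- them for the bottom half, instead of A's per-cell conditional nested loop (objective: alternative).

-- ===== PORT A =====
def help_bobby (n : Int) : List (List Int) :=
  let st := (PySem.List.pyRange 0 n 1).foldl
    (fun (st : List (List Int) × Int) i =>
      let temp := (PySem.List.pyRange 0 n 1).foldl
        (fun t j =>
          if i = j then t ++ [(1 : Int)]
          else if n - st.2 = j then t ++ [(1 : Int)]
          else t ++ [(0 : Int)]) []
      (st.1 ++ [temp], st.2 + 1))
    ([], 1)
  st.1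

-- ===== PORT B =====
-- [0]*i → List.replicate i.toNat (exact: i comes from range, so 0 ≤ i);
-- half[:n//2][::-1] → (half.take (n//2).toNat).reverse (exact: n//2 ≥ 0 whenever half ≠ []).
def help_bobby_alt (n : Int) : List (List Int) :=
  let half := (PySem.List.pyRange 0 (PySem.Int.floordiv (n + 1) 2) 1).foldl
    (fun h i =>
      let gap := n - 2 * i - 2
      if 0 ≤ gap then
        h ++ [List.replicate i.toNat (0 : Int) ++ [1] ++ List.replicate gap.toNat 0
              ++ [1] ++ List.replicate i.toNat 0]
      else
        h ++ [List.replicate i.toNat (0 : Int) ++ [1] ++ List.replicate i.toNat 0])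
    []
  half ++ (half.take (PySem.Int.floordiv n 2).toNat).reverse

-- ===== PRECONDITION & SPEC =====
def Spec_help_bobby (n : Int) (out : List (List Int)) : Prop := out = help_bobby_alt n
instance (n : Int) (out : List (List Int)) : Decidable (Spec_help_bobby n out) := by unfold Spec_help_bobby; infer_instance

-- ===== CLAIM (what is proved, stated in full; the proofs are below) =====
def Claim_equal_help_bobby : Prop := ∀ (n : Int), Dom_help_bobby n → Spec_help_bobby n (help_bobby n)

-- ===== LEMMAS AND PROOFS =====

-- a foldl that only appends singletons is a map
theorem pv_foldl_app {α β : Type} (g : α → β) :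
    ∀ (l : List α) (acc : List β), l.foldl (fun t j => t ++ [g j]) acc = acc ++ l.map g := by
  intro l
  induction l with
  | nil => simp
  | cons x xs ih => intro acc; simp [List.foldl_cons, ih]

-- A's inner row loop, with count = i + 1
def pv_rowA (n i : Int) : List Int :=
  (PySem.List.pyRange 0 n 1).foldl
    (fun t j =>
      if i = j then t ++ [(1 : Int)]
      else if n - (i + 1) = j then t ++ [(1 : Int)]
      else t ++ [(0 : Int)]) []

-- B's row body
def pv_rowB (n i : Int) : List Int :=
  if 0 ≤ n - 2 * i - 2 then
    List.replicate i.toNat (0 : Int) ++ [1] ++ List.replicate (n - 2 * i - 2).toNat 0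
      ++ [1] ++ List.replicate i.toNat 0
  else
    List.replicate i.toNat (0 : Int) ++ [1] ++ List.replicate i.toNat 0

-- index characterisation of A's row
def pv_rowI (n i : Int) : List Int :=
  (List.range n.toNat).map (fun j : Nat => if i = (j : Int) ∨ n - 1 - i = (j : Int) then (1 : Int) else 0)

-- A's outer loop: the accumulated count equals (current index) + 1 throughout
theorem pv_foldA (n : Int) : ∀ (m : ℕ) (a : Int) (acc : List (List Int)), (n - a).toNat = m →
    ((PySem.List.pyRange a n 1).foldl
      (fun (st : List (List Int) × Int) i =>
        (st.1 ++ [(PySem.List.pyRange 0 n 1).foldl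
          (fun t j =>
            if i = j then t ++ [(1 : Int)]
            else if n - st.2 = j then t ++ [(1 : Int)]
            else t ++ [(0 : Int)]) []], st.2 + 1))
      (acc, a + 1)).1 = acc ++ (PySem.List.pyRange a n 1).map (fun i => pv_rowA n i) := by
  intro m
  induction m with
  | zero =>
    intro a acc h
    rw [PySem.List.pyRange_one_eq_nil (a := a) (b := n) (by omega)]
    simp
  | succ k ih =>
    intro a acc h
    rw [PySem.List.pyRange_one_cons (a := a) (b := n) (by omega)]
    simp only [List.foldl_cons, List.map_cons]
    have e : List.foldl (fun t j =>
        if a = j then t ++ [(1 : Int)] else if n - (a + 1) = j then t ++ [(1 : Int)]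
        else t ++ [(0 : Int)]) [] (PySem.List.pyRange 0 n 1) = pv_rowA n a := rfl
    rw [e, ih (a + 1) (acc ++ [pv_rowA n a]) (by omega)]
    simp

theorem pv_map_pyRange_zero {α : Type} (n : Int) (f : Int → α) :
    (PySem.List.pyRange 0 n 1).map f = (List.range n.toNat).map (fun k : Nat => f (k : Int)) := by
  rw [PySem.List.pyRange_one, List.map_map, sub_zero]
  apply List.map_congr_left
  intro x _
  simp

theorem pv_help_bobby_eq_map (n : Int) :
    help_bobby n = (List.range n.toNat).map (fun k : Nat => pv_rowA n (k : Int)) := by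
  have h := pv_foldA n (n - 0).toNat 0 [] rfl
  rw [zero_add] at h
  simp only [help_bobby]
  rw [h, List.nil_append, pv_map_pyRange_zero]

-- A's row is the 0/1 indicator of the two diagonal positions
theorem pv_rowA_eq_rowI (n i : Int) : pv_rowA n i = pv_rowI n i := by
  have hfun : (fun (t : List Int) (j : Int) =>
      if i = j then t ++ [(1 : Int)]
      else if n - (i + 1) = j then t ++ [(1 : Int)]
      else t ++ [(0 : Int)]) =
      fun t j => t ++ [if i = j ∨ n - 1 - i = j then (1 : Int) else 0] := by
    funext t j
    by_cases h1 : i = j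
    · simp [h1]
    · by_cases h2 : n - (i + 1) = j
      · have h3 : n - 1 - i = j := by omega
        simp [h1, h2, h3]
      · have h3 : ¬ (n - 1 - i = j) := by omega
        simp [h1, h2, h3]
  rw [pv_rowA, hfun, pv_foldl_app, List.nil_append, pv_map_pyRange_zero, pv_rowI]

-- A's row is symmetric under i ↦ n-1-i
theorem pv_rowI_symm (n i : Int) : pv_rowI n (n - 1 - i) = pv_rowI n i := by
  unfold pv_rowI
  apply List.map_congr_left
  intro j _
  have : (n - 1 - i = (j : Int) ∨ n - 1 - (n - 1 - i) = (j : Int)) ↔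
      (i = (j : Int) ∨ n - 1 - i = (j : Int)) := by omega
  simp only [this]

-- B's concatenated row equals the indicator row, for 0 ≤ i in the top half
theorem pv_rowB_eq_rowI (n i : Int) (h0 : 0 ≤ i) (h : 2 * i + 1 ≤ n) :
    pv_rowB n i = pv_rowI n i := by
  unfold pv_rowB pv_rowI
  split_ifs with hg
  · apply List.ext_getElem
    · simp only [List.length_append, List.length_replicate, List.length_cons,
        List.length_nil, List.length_map, List.length_range]
      omega
    · intro k h1 h2
      simp only [List.length_map, List.length_range] at h2
      simp only [List.getElem_map, List.getElem_range, List.getElem_append,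
        List.length_append, List.length_replicate, List.length_cons, List.length_nil,
        List.getElem_replicate, List.getElem_cons]
      split_ifs <;> simp_all <;> omega
  · -- middle row of odd n: 2*i = n - 1, the two positions coincide
    apply List.ext_getElem
    · simp only [List.length_append, List.length_replicate, List.length_cons,
        List.length_nil, List.length_map, List.length_range]
      omega
    · intro k h1 h2
      simp only [List.length_map, List.length_range] at h2
      simp only [List.getElem_map, List.getElem_range, List.getElem_append,
        List.length_append, List.length_replicate, List.length_cons, List.length_nil,
        List.getElem_replicate, List.getElem_cons]
      split_ifs <;> simp_all <;> omega

theorem pv_alt_eq (n : Int) :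
    help_bobby_alt n =
      (List.range (PySem.Int.floordiv (n + 1) 2).toNat).map (fun k : Nat => pv_rowB n (k : Int))
      ++ (((List.range (PySem.Int.floordiv (n + 1) 2).toNat).map (fun k : Nat => pv_rowB n (k : Int))).take
            (PySem.Int.floordiv n 2).toNat).reverse := by
  simp only [help_bobby_alt]
  have hfun : (fun (h : List (List Int)) (i : Int) =>
      let gap := n - 2 * i - 2
      if 0 ≤ gap then
        h ++ [List.replicate i.toNat (0 : Int) ++ [1] ++ List.replicate gap.toNat 0
              ++ [1] ++ List.replicate i.toNat 0]
      else
        h ++ [List.replicate i.toNat (0 : Int) ++ [1] ++ List.replicate i.toNat 0]) =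
      fun h i => h ++ [pv_rowB n i] := by
    funext h i
    simp only [pv_rowB]
    split_ifs <;> rfl
  rw [hfun, pv_foldl_app, List.nil_append, pv_map_pyRange_zero]

-- ===== VERDICT (by name: the statement is the Claim_ definition above) =====
theorem help_bobby_spec : Claim_equal_help_bobby := by
  intro n _
  show help_bobby n = help_bobby_alt n
  rw [pv_help_bobby_eq_map, pv_alt_eq]
  by_cases hn : 0 ≤ n
  case neg =>
    have h1 : n.toNat = 0 := by omega
    have h2 : (PySem.Int.floordiv (n + 1) 2).toNat = 0 := by
      have h := (PySem.Int.floordiv_lt_iff_lt_mul (a := n + 1) (b := 2) (q := 1) (by omega)).mpr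
        (by omega)
      omega
    simp [h1]
    omega
  case pos =>
    set m := (PySem.Int.floordiv (n + 1) 2).toNat with hm
    set k := (PySem.Int.floordiv n 2).toNat with hk
    have hfd1 : PySem.Int.floordiv (n + 1) 2 = (n + 1) / 2 :=
      PySem.Int.floordiv_eq_ediv_of_pos (by omega)
    have hfd2 : PySem.Int.floordiv n 2 = n / 2 :=
      PySem.Int.floordiv_eq_ediv_of_pos (by omega)
    have hmk : (m : Int) + k = n := by rw [hm, hk, hfd1, hfd2]; omega
    have hkm : k ≤ m := by rw [hm, hk, hfd1, hfd2]; omega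
    have h2m : ∀ i : ℕ, i < m → 2 * (i : Int) + 1 ≤ n := by
      intro i hi
      have : (i : Int) < PySem.Int.floordiv (n + 1) 2 := by omega
      rw [hfd1] at this; omega
    apply List.ext_getElem
    · simp only [List.length_append, List.length_reverse, List.length_take,
        List.length_map, List.length_range]
      omega
    · intro j h1 h2
      simp only [List.length_map, List.length_range] at h1
      have hjn : j < n.toNat := h1
      rw [List.getElem_map, List.getElem_range]
      by_cases hj : j < m
      · rw [List.getElem_append_left (by simpa using hj), List.getElem_map, List.getElem_range]
        rw [pv_rowA_eq_rowI, pv_rowB_eq_rowI _ _ (by omega) (h2m j hj)]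
      · have hlen1 : ((List.range m).map (fun k : Nat => pv_rowB n (k : Int))).length = m := by simp
        rw [List.getElem_append_right (by omega)]
        have htk : (((List.range m).map (fun k : Nat => pv_rowB n (k : Int))).take k).length = k := by
          simp [Nat.min_eq_left hkm]
        rw [List.getElem_reverse, List.getElem_take, List.getElem_map, List.getElem_range]
        rw [pv_rowA_eq_rowI, ← pv_rowI_symm n (j : Int)]
        rw [pv_rowB_eq_rowI _ _ (by omega) (by rw [htk, hlen1]; omega)]
        congr 1
        rw [htk, hlen1]
        omega
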